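-- pv_equiv track=rewrite | github.com/george-yuanji-wang/GAN-TAT-AD | Outcome_data/gProfiler/Plot.py | pair_lists
-- ===== SOURCE A (Python) =====
-- def pair_lists(A, B):
--     dict_B = {}
--     for sublist in B:
--         key = sublist[1]
--         if key in dict_B:
--             dict_B[key].append(sublist)
--         else:
--             dict_B[key] = [sublist]
--     result = []
--     for sublist in A:
--         key = sublist[1]
--         if key in dict_B:
--             result.extend([[sublist, match] for match in dict_B[key]])
--     return result
-- ===== SOURCE B (Python) =====
-- def pair_lists(A, B):
--     return [[a, b] for a in A for b in B if b[1] == a[1]]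
-- ===== Notes on version B (the rewrite author's own statement) =====
-- stated objective: simpler
-- what changed: Replaces the pre-built dict-of-lists index plus lookup pass with a single nested-loop comprehension that rescans B for each element of A.
import Mathlib
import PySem

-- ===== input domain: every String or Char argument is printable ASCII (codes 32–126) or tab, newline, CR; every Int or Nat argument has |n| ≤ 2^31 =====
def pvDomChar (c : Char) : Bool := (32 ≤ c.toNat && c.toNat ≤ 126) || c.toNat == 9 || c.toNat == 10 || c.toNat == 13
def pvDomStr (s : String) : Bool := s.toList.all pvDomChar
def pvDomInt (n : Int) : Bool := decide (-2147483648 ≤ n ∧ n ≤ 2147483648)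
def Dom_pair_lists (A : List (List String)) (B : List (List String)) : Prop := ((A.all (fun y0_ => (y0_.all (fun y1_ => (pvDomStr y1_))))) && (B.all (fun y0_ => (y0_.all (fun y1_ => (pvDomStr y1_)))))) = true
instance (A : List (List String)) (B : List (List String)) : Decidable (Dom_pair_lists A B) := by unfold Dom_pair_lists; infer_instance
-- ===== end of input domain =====

-- B drops the dict index and does a plain nested-loop join comprehension (simpler, same output order).

-- ===== PORT A =====
def pair_lists (A : List (List String)) (B : List (List String)) : List (List (List String)) :=
  let dictB : PySem.Dict String (List (List String)) :=
    B.foldl (fun d sub =>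
      match PySem.List.pyGet? sub 1 with
      | none => d  -- Python raises IndexError here; excluded by Pre_
      | some key =>
        match d.get? key with
        | some v => d.insert key (v ++ [sub])
        | none => d.insert key [sub]) PySem.Dict.empty
  A.foldl (fun r sub =>
    match PySem.List.pyGet? sub 1 with
    | none => r  -- Python raises IndexError here; excluded by Pre_
    | some key =>
      match dictB.get? key with
      | some v => r ++ v.map (fun m => [sub, m])
      | none => r) []

-- ===== PORT B =====
def pair_lists_alt (A : List (List String)) (B : List (List String)) : List (List (List String)) :=
  A.flatMap (fun a =>
    (B.filter (fun b => PySem.List.pyGet? b 1 == PySem.List.pyGet? a 1)).map (fun b => [a, b]))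

-- ===== PRECONDITION & SPEC =====
-- Pre_ excludes exactly the inputs on which Python A raises IndexError: some sublist of A or B
-- has fewer than two elements (sublist[1] is out of range).
def Pre_pair_lists (A : List (List String)) (B : List (List String)) : Prop :=
  (∀ s ∈ A, 2 ≤ s.length) ∧ (∀ s ∈ B, 2 ≤ s.length)
instance (A : List (List String)) (B : List (List String)) : Decidable (Pre_pair_lists A B) := by unfold Pre_pair_lists; infer_instance
def pvWitness_pair_lists : List (List String) × List (List String) :=
  ([["a", "k"], ["b", "j"]], [["c", "k"], ["d", "k"]])
def Spec_pair_lists (A : List (List String)) (B : List (List String)) (out : List (List (List String))) : Prop := out = pair_lists_alt A B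
instance (A : List (List String)) (B : List (List String)) (out : List (List (List String))) : Decidable (Spec_pair_lists A B out) := by unfold Spec_pair_lists; infer_instance

-- ===== CLAIM (what is proved, stated in full; the proofs are below) =====
def Claim_equal_pair_lists : Prop := ∀ (A : List (List String)) (B : List (List String)), Dom_pair_lists A B → Pre_pair_lists A B → Spec_pair_lists A B (pair_lists A B)

-- ===== LEMMAS AND PROOFS =====

-- The dict-building loop of A, characterised: looking up k and defaulting to [] yields
-- exactly the sublists of B whose second element is k, in order.
theorem pair_lists_dict_getD (B : List (List String))
    (d : PySem.Dict String (List (List String))) (k : String) :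
    ((B.foldl (fun d sub =>
        match PySem.List.pyGet? sub 1 with
        | none => d
        | some key =>
          match d.get? key with
          | some v => d.insert key (v ++ [sub])
          | none => d.insert key [sub]) d).get? k).getD []
      = (d.get? k).getD [] ++ B.filter (fun b => PySem.List.pyGet? b 1 == some k) := by
  induction B generalizing d with
  | nil => simp
  | cons b Bt ih =>
    simp only [List.foldl_cons, List.filter_cons]
    cases hb : PySem.List.pyGet? b 1 with
    | none => simp [ih]
    | some kb =>
      rw [show (match some kb with
          | none => d
          | some key =>
            match d.get? key with
            | some v => d.insert key (v ++ [b])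
            | none => d.insert key [b]) = d.insert kb ((d.get? kb).getD [] ++ [b]) by
        cases h : d.get? kb <;> simp [h]]
      rw [ih]
      by_cases hk : k = kb
      · subst hk
        simp [PySem.Dict.get?_insert_self]
      · rw [PySem.Dict.get?_insert_of_ne _ _ (by exact fun h => hk h)]
        have hne : ((some kb : Option String) == some k) = false := by
          rw [beq_eq_false_iff_ne]
          intro h
          injection h with h'
          exact hk h'.symm
        simp [hne]

theorem pair_lists_spec_aux (A B : List (List String))
    (hA : ∀ s ∈ A, 2 ≤ s.length) :
    pair_lists A B = pair_lists_alt A B := by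
  unfold pair_lists pair_lists_alt
  rw [PySem.List.foldl_congr_mem' (g := fun r sub => r ++
      (B.filter (fun b => PySem.List.pyGet? b 1 == PySem.List.pyGet? sub 1)).map (fun b => [sub, b]))]
  · rw [PySem.List.foldl_append_eq_flatMap]
    simp
  · intro sub hsub r
    have hlen := hA sub hsub
    cases hget : PySem.List.pyGet? sub 1 with
    | none =>
      rw [PySem.List.pyGet?_eq_none_iff] at hget
      exact absurd (by constructor <;> omega) hget
    | some k =>
      have hd := pair_lists_dict_getD B PySem.Dict.empty k
      simp only [PySem.Dict.get?_empty, Option.getD_none, List.nil_append] at hd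
      cases hq : (B.foldl (fun d sub =>
          match PySem.List.pyGet? sub 1 with
          | none => d
          | some key =>
            match d.get? key with
            | some v => d.insert key (v ++ [sub])
            | none => d.insert key [sub]) PySem.Dict.empty).get? k with
      | none =>
        rw [hq] at hd
        simp only [Option.getD_none] at hd
        simp [hq, ← hd]
      | some v =>
        rw [hq] at hd
        simp only [Option.getD_some] at hd
        simp [hq, hd]

-- ===== VERDICT (by name: the statement is the Claim_ definition above) =====
theorem pair_lists_spec : Claim_equal_pair_lists := by
  intro A B _ hPre
  exact pair_lists_spec_aux A B hPre.1
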